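-- pv_equiv track=rewrite | github.com/dimitriosvasilas/HackerRank | misc/CodeJam/2018/Qualification/SavingTheUniverse/savingTheUniverse.py | calculate_damage_arr
-- ===== SOURCE A (Python) =====
-- def calculate_damage_arr(P, D):
--     damage = []
--     damage_cur = (0, 1)
--     s_count = 0
--     for c in P:
--         if c == 'C':
--             damage_cur = (damage_cur[0], damage_cur[1]*2)
--
--         else:
--             damage_cur = (damage_cur[0]+damage_cur[1], damage_cur[1])
--             s_count += 1
--         damage.append(damage_cur)
--     if s_count > D:
--         return None
--     else:
--         return damage
-- ===== SOURCE B (Python) =====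
-- def calculate_damage_arr(P, D):
--     # pass 1: multiplier at each position
--     mults = []
--     m = 1
--     for c in P:
--         if c == 'C':
--             m *= 2
--         mults.append(m)
--     s_count = sum(1 for c in P if c != 'C')
--     if s_count > D:
--         return None
--     # pass 2: cumulative damage at each position
--     total = 0
--     damages = []
--     for c, m in zip(P, mults):
--         if c != 'C':
--             total += m
--         damages.append(total)
--     return list(zip(damages, mults))
-- ===== Notes on version B (the rewrite author's own statement) =====
-- stated objective: alternative
-- what changed: Replaced the single fused loop carrying a (damage, multiplier) tuple by two independent passes: one builds the multiplier array and the S-count, a second accumulates damages against that array, and the result is their zip.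
import Mathlib
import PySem

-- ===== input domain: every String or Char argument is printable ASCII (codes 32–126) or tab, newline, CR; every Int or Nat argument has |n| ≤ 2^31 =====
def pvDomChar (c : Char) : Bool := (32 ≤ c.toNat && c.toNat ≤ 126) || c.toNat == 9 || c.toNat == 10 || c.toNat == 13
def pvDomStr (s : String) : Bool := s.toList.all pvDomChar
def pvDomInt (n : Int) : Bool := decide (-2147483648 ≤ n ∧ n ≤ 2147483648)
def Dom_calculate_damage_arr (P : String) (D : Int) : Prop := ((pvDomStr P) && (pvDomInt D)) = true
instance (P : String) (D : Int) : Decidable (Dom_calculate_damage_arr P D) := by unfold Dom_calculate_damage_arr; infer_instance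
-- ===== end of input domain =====

-- ===== PORT A =====
-- B restructures A's single fused loop into two independent passes (multiplier array, then cumulative damage) zipped together; same cost, different decomposition.
def pvStepA (st : List (Int × Int) × (Int × Int) × Int) (c : Char) : List (Int × Int) × (Int × Int) × Int :=
  if c = 'C' then
    let cur := (st.2.1.1, st.2.1.2 * 2)
    (st.1 ++ [cur], cur, st.2.2)
  else
    let cur := (st.2.1.1 + st.2.1.2, st.2.1.2)
    (st.1 ++ [cur], cur, st.2.2 + 1)

def calculate_damage_arr (P : String) (D : Int) : Option (List (Int × Int)) :=
  let st := P.toList.foldl pvStepA ([], (0, 1), 0)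
  if st.2.2 > D then none else some st.1

-- ===== PORT B =====
-- pass 1 of Source B: multiplier at each position
def pvMults : List Char → Int → List Int
  | [], _ => []
  | c :: cs, m =>
    let m' := if c = 'C' then m * 2 else m
    m' :: pvMults cs m'

-- pass 2 of Source B: running damage total along (char, mult) pairs
def pvDamages : List Char → List Int → Int → List Int
  | c :: cs, m :: ms, t =>
    let t' := if c ≠ 'C' then t + m else t
    t' :: pvDamages cs ms t'
  | _, _, _ => []

def calculate_damage_arr_alt (P : String) (D : Int) : Option (List (Int × Int)) :=
  let ms := pvMults P.toList 1
  let s_count : Int := (P.toList.filter (fun c => c ≠ 'C')).length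
  if s_count > D then none
  else some ((pvDamages P.toList ms 0).zip ms)

-- ===== PRECONDITION & SPEC =====
def Spec_calculate_damage_arr (P : String) (D : Int) (out : Option (List (Int × Int))) : Prop := out = calculate_damage_arr_alt P D
instance (P : String) (D : Int) (out : Option (List (Int × Int))) : Decidable (Spec_calculate_damage_arr P D out) := by unfold Spec_calculate_damage_arr; infer_instance

-- ===== CLAIM (what is proved, stated in full; the proofs are below) =====
def Claim_equal_calculate_damage_arr : Prop := ∀ (P : String) (D : Int), Dom_calculate_damage_arr P D → Spec_calculate_damage_arr P D (calculate_damage_arr P D)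

-- ===== LEMMAS AND PROOFS =====

-- A's fold, from any state, appends exactly B's zipped two-pass arrays and adds the S-count.
theorem pvFoldA (cs : List Char) : ∀ (acc : List (Int × Int)) (d m s : Int),
    ∃ cur, List.foldl pvStepA (acc, (d, m), s) cs =
      (acc ++ (pvDamages cs (pvMults cs m) d).zip (pvMults cs m), cur,
       s + ((cs.filter (fun c => c ≠ 'C')).length : Int)) := by
  induction cs with
  | nil => intro acc d m s; exact ⟨(d, m), by simp [pvDamages, pvMults]⟩
  | cons c cs ih =>
    intro acc d m s
    by_cases h : c = 'C'
    · obtain ⟨cur, hcur⟩ := ih (acc ++ [(d, m * 2)]) d (m * 2) s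
      refine ⟨cur, ?_⟩
      simp [pvStepA, h, pvMults, pvDamages, hcur, List.zip]
    · obtain ⟨cur, hcur⟩ := ih (acc ++ [(d + m, m)]) (d + m) m (s + 1)
      refine ⟨cur, ?_⟩
      simp only [List.foldl_cons, pvStepA, if_neg h]
      rw [hcur]
      simp [pvMults, pvDamages, h, List.zip]
      ring

-- ===== VERDICT (by name: the statement is the Claim_ definition above) =====
theorem calculate_damage_arr_spec : Claim_equal_calculate_damage_arr := by
  intro P D _
  unfold Spec_calculate_damage_arr calculate_damage_arr calculate_damage_arr_alt
  obtain ⟨cur, hcur⟩ := pvFoldA P.toList [] 0 1 0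
  simp only [hcur, List.nil_append, zero_add]
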